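-- pv_equiv track=rewrite | github.com/bashonly/yt-dlp | devscripts/utils.py | requirements_update
-- ===== SOURCE A (Python) =====
-- import collections.abc
--
-- def requirements_update(
--     lines: collections.abc.Iterable[str],
--     package: str,
--     new_version: str,
--     new_hashes: list[str],
-- ):
--     first_comment = True
--     current = []
--     for line in lines:
--         if not line.endswith('\n'):
--             line += '\n'
--
--         if first_comment:
--             comment_line = line.strip()
--             if comment_line.startswith('#'):
--                 yield line
--                 continue
--
--             first_comment = False
--             yield '# It was later updated using devscripts/update_ejs.py\n'
--
--         current.append(line)
--         if line.endswith('\\\n'):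
--             # continue logical line
--             continue
--
--         if not current[0].startswith(f'{package}=='):
--             yield from current
--
--         else:
--             yield f'{package}=={new_version} \\\n'
--             for digest in new_hashes[:-1]:
--                 yield f'    --hash={digest} \\\n'
--             yield f'    --hash={new_hashes[-1]}\n'
--
--         current.clear()
-- ===== SOURCE B (Python) =====
-- def requirements_update(lines, package, new_version, new_hashes):
--     # Streaming DFA, no line buffer: the package test happens at the START of each
--     # logical line and every physical line is emitted (or skipped) immediately.
--     state = 'header'
--     for raw in lines:
--         line = raw if raw.endswith('\n') else raw + '\n'
--         if state == 'header':
--             if line.strip().startswith('#'):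
--                 yield line
--                 continue
--             yield '# It was later updated using devscripts/update_ejs.py\n'
--             state = 'start'
--         if state == 'start':
--             if line.startswith(f'{package}=='):
--                 yield from _hash_block(package, new_version, new_hashes)
--                 state = 'skip'
--             else:
--                 yield line
--                 state = 'copy'
--         elif state == 'copy':
--             yield line
--         # state == 'skip': emit nothing
--         if not line.endswith('\\\n'):
--             state = 'start'
--
--
-- def _hash_block(package, new_version, new_hashes):
--     yield f'{package}=={new_version} \\\n'
--     for digest in new_hashes[:-1]:
--         yield f'    --hash={digest} \\\n'
--     yield f'    --hash={new_hashes[-1]}\n'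
-- ===== Notes on version B (the rewrite author's own statement) =====
-- stated objective: alternative
-- what changed: A buffers each logical line in a 'current' list and decides/flushes at the group's END; B keeps no buffer at all and runs a four-state streaming DFA (header/start/copy/skip) that decides at the group's START and emits or skips every physical line immediately.
-- intended difference: When the body ends in an unterminated continuation line (last non-header line ends with a backslash), A silently drops the entire trailing logical line from the output, while B passes its lines through (or emits the replacement block); not losing input lines is the intended behaviour of a requirements-file rewriter. — e.g. on requirements_update(["x \\\n"], "pkg", "1.0", ["h"]): A returns ["# It was later updated using devscripts/update_ejs.py\n"], B returns ["# It was later updated using devscripts/update_ejs.py\n", "x \\\n"]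
import Mathlib
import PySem

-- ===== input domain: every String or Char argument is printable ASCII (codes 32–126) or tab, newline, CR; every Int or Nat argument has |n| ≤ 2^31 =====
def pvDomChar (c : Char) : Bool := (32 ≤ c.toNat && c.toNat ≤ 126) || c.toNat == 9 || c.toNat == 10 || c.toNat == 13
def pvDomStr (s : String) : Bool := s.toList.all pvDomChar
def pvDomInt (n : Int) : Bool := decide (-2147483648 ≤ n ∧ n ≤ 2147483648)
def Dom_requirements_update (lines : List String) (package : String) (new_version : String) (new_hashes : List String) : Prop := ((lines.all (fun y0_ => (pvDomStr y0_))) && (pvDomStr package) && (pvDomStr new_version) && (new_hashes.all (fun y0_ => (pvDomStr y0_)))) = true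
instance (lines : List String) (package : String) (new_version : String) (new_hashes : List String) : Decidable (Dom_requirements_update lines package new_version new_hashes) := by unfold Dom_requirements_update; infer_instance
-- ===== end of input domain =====

-- B replaces A's buffer-and-flush loop (logical line collected in 'current', decision at group
-- END) by a bufferless four-state streaming DFA deciding at group START; on a body ending in an
-- unterminated continuation line A drops the trailing logical line, B passes it through (D_).


-- shared helper: Python's  line = line if line.endswith('\n') else line + '\n'
def normLine (l : String) : String := if PySem.Str.endswith l "\n" then l else l ++ "\n"

-- ===== PORT A =====
-- A's generator loop, state = (remaining lines, first_comment flag, current buffer); yields are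
-- prepended.  current[0] is read with headD "" (never empty there).  new_hashes[-1] is read with
-- pyGetD (-1) "": Python raises IndexError when new_hashes = [], excluded by Pre_.
def reqALoop (package : String) (new_version : String) (new_hashes : List String) :
    List String → Bool → List String → List String
  | [], _, _ => []
  | raw :: rest, firstComment, current =>
    let line := normLine raw
    if firstComment = true ∧ PySem.Str.startswith (PySem.Str.strip line) "#" = true then
      line :: reqALoop package new_version new_hashes rest firstComment current
    else
      let pre := if firstComment then ["# It was later updated using devscripts/update_ejs.py\n"] else []
      let current := current ++ [line]
      if PySem.Str.endswith line "\\\n" then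
        pre ++ reqALoop package new_version new_hashes rest false current
      else
        let block :=
          if !(PySem.Str.startswith (current.headD "") (package ++ "==")) then current
          else (package ++ "==" ++ new_version ++ " \\\n")
               :: (PySem.List.slice new_hashes none (some (-1))).map
                    (fun digest => "    --hash=" ++ digest ++ " \\\n")
               ++ ["    --hash=" ++ PySem.List.pyGetD new_hashes (-1) "" ++ "\n"]
        pre ++ block ++ reqALoop package new_version new_hashes rest false []

def requirements_update (lines : List String) (package : String) (new_version : String) (new_hashes : List String) : List String :=
  reqALoop package new_version new_hashes lines true []

-- ===== PORT B =====
-- B's DFA states: 'header' | 'start' (at start of a logical line) | 'copy' | 'skip'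
inductive BState where
  | header | start | copy | skip
deriving DecidableEq, Repr

-- _hash_block(package, new_version, new_hashes)  (new_hashes[-1] as in port A)
def hashBlock (package : String) (new_version : String) (new_hashes : List String) : List String :=
  (package ++ "==" ++ new_version ++ " \\\n")
    :: (PySem.List.slice new_hashes none (some (-1))).map
         (fun digest => "    --hash=" ++ digest ++ " \\\n")
    ++ ["    --hash=" ++ PySem.List.pyGetD new_hashes (-1) "" ++ "\n"]

-- B's loop: every physical line is emitted (or skipped) immediately; no buffer.
def bLoop (package : String) (new_version : String) (new_hashes : List String) :
    List String → BState → List String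
  | [], _ => []
  | raw :: rest, st =>
    let line := normLine raw
    if st = BState.header ∧ PySem.Str.startswith (PySem.Str.strip line) "#" = true then
      line :: bLoop package new_version new_hashes rest BState.header
    else
      let pre := if st = BState.header then ["# It was later updated using devscripts/update_ejs.py\n"] else []
      let st1 := if st = BState.header then BState.start else st
      let step : List String × BState :=
        match st1 with
        | BState.start =>
          if PySem.Str.startswith line (package ++ "==") then
            (hashBlock package new_version new_hashes, BState.skip)
          else ([line], BState.copy)
        | BState.copy => ([line], BState.copy)
        | _ => ([], BState.skip)
      pre ++ step.1 ++ bLoop package new_version new_hashes rest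
        (if PySem.Str.endswith line "\\\n" then step.2 else BState.start)

def requirements_update_alt (lines : List String) (package : String) (new_version : String) (new_hashes : List String) : List String :=
  bLoop package new_version new_hashes lines BState.header

-- ===== PRECONDITION & SPEC =====
-- Pre_ excludes inputs where new_hashes is empty yet some (newline-normalized) line starts with
-- 'package==': reaching the replacement with an empty hash list makes the Python raise
-- IndexError on new_hashes[-1]; the guard is conservative (any such line), so it also excludes
-- some inputs on which A returns (see claim cites).
def Pre_requirements_update (lines : List String) (package : String) (new_version : String) (new_hashes : List String) : Prop :=
  new_hashes ≠ [] ∨ ∀ line ∈ lines, PySem.Str.startswith (normLine line) (package ++ "==") = false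
instance (lines : List String) (package : String) (new_version : String) (new_hashes : List String) : Decidable (Pre_requirements_update lines package new_version new_hashes) := by unfold Pre_requirements_update; infer_instance

def pvWitness_requirements_update : List String × String × String × List String :=
  (["# header\n", "foo==1.0\n"], "foo", "2.0", ["abc123"])

-- When the body (lines after the leading comments, newline-normalized) ends in an unterminated
-- continuation line, A silently drops the whole trailing logical line while B passes its lines
-- through (or emits the replacement block); not losing input lines is the intended behaviour.
def D_requirements_update (lines : List String) (package : String) (new_version : String) (new_hashes : List String) : Prop :=
  PySem.Str.endswith
    (((lines.map normLine).dropWhile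
        (fun l => PySem.Str.startswith (PySem.Str.strip l) "#")).getLastD "") "\\\n" = true
instance (lines : List String) (package : String) (new_version : String) (new_hashes : List String) : Decidable (D_requirements_update lines package new_version new_hashes) := by unfold D_requirements_update; infer_instance

def Spec_requirements_update (lines : List String) (package : String) (new_version : String) (new_hashes : List String) (out : List String) : Prop := ¬ D_requirements_update lines package new_version new_hashes → out = requirements_update_alt lines package new_version new_hashes
instance (lines : List String) (package : String) (new_version : String) (new_hashes : List String) (out : List String) : Decidable (Spec_requirements_update lines package new_version new_hashes out) := by unfold Spec_requirements_update; infer_instance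

def pvDiffWitness_requirements_update : List String × String × String × List String :=
  (["x \\\n"], "pkg", "1.0", ["h"])

def pvDiffWitnessOut_requirements_update : (List String) × (List String) :=
  (["# It was later updated using devscripts/update_ejs.py\n"],
   ["# It was later updated using devscripts/update_ejs.py\n", "x \\\n"])

-- ===== CLAIM (what is proved, stated in full; the proofs are below) =====
def Claim_unchanged_requirements_update : Prop := ∀ (lines : List String) (package : String) (new_version : String) (new_hashes : List String), Dom_requirements_update lines package new_version new_hashes → Pre_requirements_update lines package new_version new_hashes → Spec_requirements_update lines package new_version new_hashes (requirements_update lines package new_version new_hashes)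
def Claim_changed_requirements_update : Prop := Dom_requirements_update (pvDiffWitness_requirements_update.1) (pvDiffWitness_requirements_update.2.1) (pvDiffWitness_requirements_update.2.2.1) (pvDiffWitness_requirements_update.2.2.2) ∧ Pre_requirements_update (pvDiffWitness_requirements_update.1) (pvDiffWitness_requirements_update.2.1) (pvDiffWitness_requirements_update.2.2.1) (pvDiffWitness_requirements_update.2.2.2) ∧ D_requirements_update (pvDiffWitness_requirements_update.1) (pvDiffWitness_requirements_update.2.1) (pvDiffWitness_requirements_update.2.2.1) (pvDiffWitness_requirements_update.2.2.2) ∧ requirements_update (pvDiffWitness_requirements_update.1) (pvDiffWitness_requirements_update.2.1) (pvDiffWitness_requirements_update.2.2.1) (pvDiffWitness_requirements_update.2.2.2) = pvDiffWitnessOut_requirements_update.1 ∧ requirements_update_alt (pvDiffWitness_requirements_update.1) (pvDiffWitness_requirements_update.2.1) (pvDiffWitness_requirements_update.2.2.1) (pvDiffWitness_requirements_update.2.2.2) = pvDiffWitnessOut_requirements_update.2 ∧ pvDiffWitnessOut_requirements_update.1 ≠ pvDiffWitnessOut_requirements_update.2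

-- ===== LEMMAS AND PROOFS =====

-- true iff rest is empty or its last normalized line terminates its logical line
def tailOK (rest : List String) : Bool :=
  match rest.getLast? with
  | none => true
  | some l => !PySem.Str.endswith (normLine l) "\\\n"

-- true iff rest is nonempty and its last normalized line terminates its logical line
def hasEnd (rest : List String) : Bool :=
  match rest.getLast? with
  | none => false
  | some l => !PySem.Str.endswith (normLine l) "\\\n"

theorem hasEnd_eq_tailOK (u : String) (r : List String) : hasEnd (u :: r) = tailOK (u :: r) := by
  simp only [hasEnd, tailOK]
  cases h : (u :: r).getLast? with
  | none => simp at h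
  | some x => rfl

theorem tailOK_tail {t : String} {r : List String} (h : tailOK (t :: r) = true) : tailOK r = true := by
  cases r with
  | nil => rfl
  | cons u r' => simpa only [tailOK, List.getLast?_cons_cons] using h

theorem hasEnd_of_cont {t : String} {r : List String} (h : tailOK (t :: r) = true)
    (hc : PySem.Chars.endswith (normLine t).toList ['\\', '\n'] = true) : hasEnd r = true := by
  cases r with
  | nil => simp [tailOK, List.getLast?, hc] at h
  | cons u r' =>
    rw [hasEnd_eq_tailOK]
    simpa only [tailOK, List.getLast?_cons_cons] using h

theorem tailOK_of_hasEnd {r : List String} (h : hasEnd r = true) : tailOK r = true := by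
  cases r with
  | nil => rfl
  | cons u r' => rw [← hasEnd_eq_tailOK]; exact h

theorem tailOK_of_lastD : ∀ (lines : List String),
    PySem.Str.endswith ((lines.map normLine).getLastD "") "\\\n" = false → tailOK lines = true
  | [], _ => rfl
  | [l], h => by
    simp only [List.map_cons, List.map_nil, List.getLastD_cons, List.getLastD_nil] at h
    simp only [tailOK, List.getLast?]
    have h' : PySem.Chars.endswith (normLine l).toList ['\\', '\n'] = false := by simpa using h
    simp [h']
  | l :: u :: r, h => by
    have := tailOK_of_lastD (u :: r) (by simpa only [List.map_cons, List.getLastD_cons] using h)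
    simpa only [tailOK, List.getLast?_cons_cons] using this

theorem bigLemma (p v : String) (hs : List String) :
    ∀ rest : List String,
      (tailOK rest = true →
        reqALoop p v hs rest false [] = bLoop p v hs rest BState.start)
      ∧ (hasEnd rest = true → ∀ c0 cs, PySem.Str.startswith c0 (p ++ "==") = false →
        reqALoop p v hs rest false (c0 :: cs) = (c0 :: cs) ++ bLoop p v hs rest BState.copy)
      ∧ (hasEnd rest = true → ∀ c0 cs, PySem.Str.startswith c0 (p ++ "==") = true →
        reqALoop p v hs rest false (c0 :: cs) = hashBlock p v hs ++ bLoop p v hs rest BState.skip) := by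
  intro rest
  induction rest with
  | nil => refine ⟨fun _ => rfl, fun hE => by simp [hasEnd, List.getLast?] at hE,
                   fun hE => by simp [hasEnd, List.getLast?] at hE⟩
  | cons t r IH =>
    obtain ⟨IH1, IH2, IH3⟩ := IH
    by_cases hc : PySem.Chars.endswith (normLine t).toList ['\\', '\n'] = true
    · refine ⟨fun hT => ?_, fun hE c0 cs hm => ?_, fun hE c0 cs hm => ?_⟩
      · have hEr : hasEnd r = true := hasEnd_of_cont hT hc
        by_cases hm : PySem.Chars.startswith (normLine t).toList (p.toList ++ ['=', '=']) = true
        · have hm' : PySem.Str.startswith (normLine t) (p ++ "==") = true := by simpa using hm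
          simp [reqALoop, bLoop, hc, hm, IH3 hEr (normLine t) [] hm', hashBlock]
        · simp only [Bool.not_eq_true] at hm
          have hm' : PySem.Str.startswith (normLine t) (p ++ "==") = false := by simpa using hm
          simp [reqALoop, bLoop, hc, hm, IH2 hEr (normLine t) [] hm']
      · have hEr : hasEnd r = true := hasEnd_of_cont (tailOK_of_hasEnd hE) hc
        simp [reqALoop, bLoop, hc, IH2 hEr c0 (cs ++ [normLine t]) hm]
      · have hEr : hasEnd r = true := hasEnd_of_cont (tailOK_of_hasEnd hE) hc
        simp [reqALoop, bLoop, hc, IH3 hEr c0 (cs ++ [normLine t]) hm]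
    · simp only [Bool.not_eq_true] at hc
      refine ⟨fun hT => ?_, fun hE c0 cs hm => ?_, fun hE c0 cs hm => ?_⟩
      · have hTr : tailOK r = true := tailOK_tail hT
        by_cases hm : PySem.Chars.startswith (normLine t).toList (p.toList ++ ['=', '=']) = true
        · simp [reqALoop, bLoop, hc, hm, IH1 hTr, hashBlock]
        · simp only [Bool.not_eq_true] at hm
          simp [reqALoop, bLoop, hc, hm, IH1 hTr]
      · have hTr : tailOK r = true := tailOK_tail (tailOK_of_hasEnd hE)
        have hm' : PySem.Chars.startswith c0.toList (p.toList ++ ['=', '=']) = false := by simpa using hm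
        simp [reqALoop, bLoop, hc, hm', IH1 hTr]
      · have hTr : tailOK r = true := tailOK_tail (tailOK_of_hasEnd hE)
        have hm' : PySem.Chars.startswith c0.toList (p.toList ++ ['=', '=']) = true := by simpa using hm
        simp [reqALoop, bLoop, hc, hm', IH1 hTr, hashBlock]

theorem headerLemma (p v : String) (hs : List String) :
    ∀ lines : List String,
      PySem.Str.endswith
        (((lines.map normLine).dropWhile
            (fun l => PySem.Str.startswith (PySem.Str.strip l) "#")).getLastD "") "\\\n" = false →
      reqALoop p v hs lines true [] = bLoop p v hs lines BState.header := by
  intro lines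
  induction lines with
  | nil => intro _; rfl
  | cons l r IH =>
    intro hD
    by_cases hcom : PySem.Chars.startswith (PySem.Chars.strip (normLine l).toList) ['#'] = true
    · have hD' : PySem.Str.endswith
          (((r.map normLine).dropWhile
              (fun l => PySem.Str.startswith (PySem.Str.strip l) "#")).getLastD "") "\\\n" = false := by
        simpa [List.dropWhile_cons, hcom] using hD
      simp [reqALoop, bLoop, hcom, IH hD']
    · simp only [Bool.not_eq_true] at hcom
      have hD' : PySem.Str.endswith (((l :: r).map normLine).getLastD "") "\\\n" = false := by
        simpa [List.dropWhile_cons, hcom] using hD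
      have hT : tailOK (l :: r) = true := tailOK_of_lastD (l :: r) hD'
      have hstep := (bigLemma p v hs (l :: r)).1 hT
      have hA : reqALoop p v hs (l :: r) true [] =
          "# It was later updated using devscripts/update_ejs.py\n" :: reqALoop p v hs (l :: r) false [] := by
        simp only [reqALoop]
        by_cases h : PySem.Chars.endswith (normLine l).toList ['\\', '\n'] = true <;> simp [h, hcom]
      have hB : bLoop p v hs (l :: r) BState.header =
          "# It was later updated using devscripts/update_ejs.py\n" :: bLoop p v hs (l :: r) BState.start := by
        simp only [bLoop]
        by_cases h : PySem.Chars.endswith (normLine l).toList ['\\', '\n'] = true <;> simp [h, hcom]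
      rw [hA, hB, hstep]

-- ===== VERDICT (by name: the statement is the Claim_ definition above) =====
theorem requirements_update_spec : Claim_unchanged_requirements_update := by
  intro lines package new_version new_hashes _ _ hD
  unfold requirements_update requirements_update_alt
  apply headerLemma
  unfold D_requirements_update at hD
  exact Bool.eq_false_iff.mpr (fun h => hD h)

theorem requirements_update_changed : Claim_changed_requirements_update := by
  unfold Claim_changed_requirements_update; decide
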